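-- pv_equiv track=rewrite | github.com/nisargsuthar/Veritas | primer.py | fixAscii
-- ===== SOURCE A (Python) =====
-- def fixAscii(data):
-- 	bi = 0
-- 	colors = {}
-- 	removeEndIndices = []
-- 	while bi < len(data):
-- 		currentByte = data[bi:bi+1]
-- 		if currentByte == "\n":
-- 			bi += 1
-- 			if data[bi:bi+2] == "[/":
-- 				removeEndIndices.append(bi)
-- 			else:
-- 				colors.update({bi: lastColor})
-- 		match currentByte:
-- 			case "[" if data[bi+1:bi+2] == "c":
-- 				lastColor = data[bi+7:bi+7+6]
-- 				bi += 14
-- 			case "[" if data[bi+1:bi+2] == "/":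
-- 				bi += 7
-- 				lastColor = ""
-- 		bi += 1
--
-- 	colors = {key:val for key, val in colors.items() if val != ""}
--
-- 	for key, val in reversed(colors.items()):
-- 		data = data[:key] + "[color={}]".format(val) + data[key:]
--
-- 	return data.replace("\n[/color]", "\n")
-- ===== SOURCE B (Python) =====
-- def fixAscii(data):
-- 	# stage 1: tokenize (stateless lexer; token boundaries do not depend on color state)
-- 	toks = []
-- 	i = 0
-- 	n = len(data)
-- 	while i < n:
-- 		c = data[i]
-- 		if c == "\n":
-- 			toks.append(("nl", data[i+1:i+3] == "[/", data[i+1:i+2]))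
-- 			i += 2
-- 		elif c == "[" and data[i+1:i+2] == "c":
-- 			toks.append(("open", data[i+7:i+13], data[i:i+15]))
-- 			i += 15
-- 		elif c == "[" and data[i+1:i+2] == "/":
-- 			toks.append(("close", data[i:i+8]))
-- 			i += 8
-- 		else:
-- 			toks.append(("chr", c))
-- 			i += 1
-- 	# stage 2: render, threading the current color through the token stream
-- 	out = []
-- 	last = ""
-- 	for t in toks:
-- 		if t[0] == "nl":
-- 			out.append("\n")
-- 			if not t[1] and last:
-- 				out.append("[color={}]".format(last))
-- 			out.append(t[2])
-- 		elif t[0] == "open":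
-- 			last = t[1]
-- 			out.append(t[2])
-- 		elif t[0] == "close":
-- 			last = ""
-- 			out.append(t[1])
-- 		else:
-- 			out.append(t[1])
-- 	return "".join(out).replace("\n[/color]", "\n")
-- ===== Notes on version B (the rewrite author's own statement) =====
-- stated objective: alternative
-- what changed: B replaces A's scan-collect-and-splice (dict of insertion indices, then one whole-string splice per inserted tag) with a two-stage pipeline: a stateless tokenizer producing a token list, then a fold over the tokens threading the current color and emitting output pieces joined once.
import Mathlib
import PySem

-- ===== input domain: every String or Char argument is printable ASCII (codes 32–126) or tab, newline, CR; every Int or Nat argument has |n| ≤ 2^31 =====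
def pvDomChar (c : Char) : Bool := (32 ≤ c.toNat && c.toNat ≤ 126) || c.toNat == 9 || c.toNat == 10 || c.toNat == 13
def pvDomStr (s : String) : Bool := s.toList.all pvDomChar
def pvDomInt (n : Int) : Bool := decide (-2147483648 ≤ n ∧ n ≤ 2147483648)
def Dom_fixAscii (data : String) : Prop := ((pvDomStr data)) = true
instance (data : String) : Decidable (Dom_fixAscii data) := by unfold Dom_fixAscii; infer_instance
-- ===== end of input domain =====

-- B is a two-stage pipeline (stateless tokenizer, then a rendering fold threading the color)
-- instead of A's dict of insertion indices plus one whole-string splice per inserted tag.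
-- A's Python raises NameError when a newline (not followed by "[/") precedes every color tag
-- (lastColor unbound); Pre_fixAscii excludes exactly those inputs, the port models the unbound
-- variable as "".

-- ===== PORT A =====
-- "[color={}]".format(val)
def pvTag (v : List Char) : List Char := ['[','c','o','l','o','r','='] ++ v ++ [']']

-- the while loop of A, with fuel = one unit per loop iteration (bi strictly increases, so
-- cs.length fuel is always enough); slices data[i:j] with 0 ≤ i ≤ j are ported as
-- (drop i).take (j-i), exact for nonnegative bounds; removeEndIndices is written but never
-- read, so it is omitted; in the "\n" branch the subsequent match cannot fire (currentByte
-- is "\n"), so the loop directly advances by 2.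
def fixAsciiScan (cs : List Char) : Nat → Nat → List Char → PySem.Dict Nat (List Char) → PySem.Dict Nat (List Char)
  | 0, _, _, colors => colors
  | fuel+1, bi, lastColor, colors =>
    if bi < cs.length then
      if (cs.drop bi).take 1 = ['\n'] then
        if (cs.drop (bi+1)).take 2 = ['[', '/'] then
          fixAsciiScan cs fuel (bi+2) lastColor colors
        else
          fixAsciiScan cs fuel (bi+2) lastColor (colors.insert (bi+1) lastColor)
      else if (cs.drop bi).take 1 = ['['] ∧ (cs.drop (bi+1)).take 1 = ['c'] then
        fixAsciiScan cs fuel (bi+15) ((cs.drop (bi+7)).take 6) colors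
      else if (cs.drop bi).take 1 = ['['] ∧ (cs.drop (bi+1)).take 1 = ['/'] then
        fixAsciiScan cs fuel (bi+8) [] colors
      else
        fixAsciiScan cs fuel (bi+1) lastColor colors
    else colors

def fixAscii (data : String) : String :=
  let cs := data.toList
  let colors := fixAsciiScan cs cs.length 0 [] PySem.Dict.empty
  -- {key:val for key, val in colors.items() if val != ""}, immediately iterated as items():
  -- keys are distinct, so the rebuilt dict's items are the filtered items list (exact)
  let filtered := colors.items.filter (fun kv => decide (kv.2 ≠ ([] : List Char)))
  -- for key, val in reversed(...): data = data[:key] + tag + data[key:]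
  let spliced := filtered.reverse.foldl (fun d kv => d.take kv.1 ++ pvTag kv.2 ++ d.drop kv.1) cs
  String.ofList (PySem.Chars.replace spliced ['\n','[','/','c','o','l','o','r',']'] ['\n'])

-- ===== PORT B =====
-- the token type of Source B's stage 1 (the tuples ("nl", isClose, nxt) / ("open", val, raw) /
-- ("close", raw) / ("chr", c))
inductive PvTok : Type
  | nl : Bool → List Char → PvTok
  | opn : List Char → List Char → PvTok
  | cls : List Char → PvTok
  | chr : Char → PvTok
deriving DecidableEq, Repr

-- stage 1 of Source B: the stateless lexer (fuel = one unit per loop iteration; i strictly increases)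
def fixAsciiLex (cs : List Char) : Nat → Nat → List PvTok
  | 0, _ => []
  | fuel+1, bi =>
    if bi < cs.length then
      let c := cs.getD bi ' '   -- data[i]; bi < len, so the default is never used
      if c = '\n' then
        PvTok.nl (decide ((cs.drop (bi+1)).take 2 = ['[','/'])) ((cs.drop (bi+1)).take 1)
          :: fixAsciiLex cs fuel (bi+2)
      else if c = '[' ∧ (cs.drop (bi+1)).take 1 = ['c'] then
        PvTok.opn ((cs.drop (bi+7)).take 6) ((cs.drop bi).take 15) :: fixAsciiLex cs fuel (bi+15)
      else if c = '[' ∧ (cs.drop (bi+1)).take 1 = ['/'] then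
        PvTok.cls ((cs.drop bi).take 8) :: fixAsciiLex cs fuel (bi+8)
      else
        PvTok.chr c :: fixAsciiLex cs fuel (bi+1)
    else []

-- stage 2 of Source B: one step of the rendering fold; state = (last, out)
def fixAsciiRender (st : List Char × List (List Char)) (t : PvTok) : List Char × List (List Char) :=
  match t with
  | PvTok.nl isClose nxt =>
      let out1 := st.2 ++ [['\n']]
      let out2 := if isClose = false ∧ st.1 ≠ [] then out1 ++ [pvTag st.1] else out1
      (st.1, out2 ++ [nxt])
  | PvTok.opn v raw => (v, st.2 ++ [raw])
  | PvTok.cls raw => ([], st.2 ++ [raw])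
  | PvTok.chr c => (st.1, st.2 ++ [[c]])

def fixAscii_alt (data : String) : String :=
  let cs := data.toList
  let toks := fixAsciiLex cs cs.length 0
  let res := toks.foldl fixAsciiRender ([], [])
  String.ofList (PySem.Chars.replace (PySem.Chars.join [] res.2) ['\n','[','/','c','o','l','o','r',']'] ['\n'])

-- ===== PRECONDITION & SPEC =====
-- a position q at which A's scanner binds lastColor: "[c", or "[/" not directly after a newline
def pvBinder (cs : List Char) (q : Nat) : Bool :=
  (cs.drop q).take 2 = ['[','c'] ||
    ((cs.drop q).take 2 = ['[','/'] && (q = 0 || cs.getD (q-1) ' ' != '\n'))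

-- A raises NameError iff some newline not followed by "[/" has no binder before it;
-- Pre_ is exactly the complement (A returns normally)
def Pre_fixAscii (data : String) : Prop :=
  ∀ p < data.toList.length,
    (data.toList.getD p ' ' = '\n' ∧ (data.toList.drop (p+1)).take 2 ≠ ['[', '/']) →
      ∃ q < p, pvBinder data.toList q = true

instance (data : String) : Decidable (Pre_fixAscii data) := by unfold Pre_fixAscii; infer_instance

def pvWitness_fixAscii : String := "[color=ff00ff]ab\ncd"

def Spec_fixAscii (data : String) (out : String) : Prop := out = fixAscii_alt data
instance (data : String) (out : String) : Decidable (Spec_fixAscii data out) := by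
  unfold Spec_fixAscii; infer_instance

-- ===== CLAIM (what is proved, stated in full; the proofs are below) =====
def Claim_equal_fixAscii : Prop :=
  ∀ (data : String), Dom_fixAscii data → Pre_fixAscii data → Spec_fixAscii data (fixAscii data)

-- ===== LEMMAS AND PROOFS =====

-- the insertion points A's scan records, as a plain list (keys strictly above bi, increasing)
def pvIns (cs : List Char) : Nat → Nat → List Char → List (Nat × List Char)
  | 0, _, _ => []
  | fuel+1, bi, lc =>
    if bi < cs.length then
      if (cs.drop bi).take 1 = ['\n'] then
        if (cs.drop (bi+1)).take 2 = ['[', '/'] then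
          pvIns cs fuel (bi+2) lc
        else
          (bi+1, lc) :: pvIns cs fuel (bi+2) lc
      else if (cs.drop bi).take 1 = ['['] ∧ (cs.drop (bi+1)).take 1 = ['c'] then
        pvIns cs fuel (bi+15) ((cs.drop (bi+7)).take 6)
      else if (cs.drop bi).take 1 = ['['] ∧ (cs.drop (bi+1)).take 1 = ['/'] then
        pvIns cs fuel (bi+8) []
      else
        pvIns cs fuel (bi+1) lc
    else []

-- the characters B's render fold emits from a scanner state, without the accumulator
def pvEmit (cs : List Char) : Nat → Nat → List Char → List Char
  | 0, _, _ => []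
  | fuel+1, bi, lc =>
    if bi < cs.length then
      if (cs.drop bi).take 1 = ['\n'] then
        '\n' :: ((if (cs.drop (bi+1)).take 2 ≠ ['[','/'] ∧ lc ≠ [] then pvTag lc else []) ++
          (cs.drop (bi+1)).take 1 ++ pvEmit cs fuel (bi+2) lc)
      else if (cs.drop bi).take 1 = ['['] ∧ (cs.drop (bi+1)).take 1 = ['c'] then
        (cs.drop bi).take 15 ++ pvEmit cs fuel (bi+15) ((cs.drop (bi+7)).take 6)
      else if (cs.drop bi).take 1 = ['['] ∧ (cs.drop (bi+1)).take 1 = ['/'] then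
        (cs.drop bi).take 8 ++ pvEmit cs fuel (bi+8) []
      else
        (cs.drop bi).take 1 ++ pvEmit cs fuel (bi+1) lc
    else []


lemma pvScan_items (cs : List Char) (fuel : Nat) :
    ∀ (bi : Nat) (lc : List Char) (d : PySem.Dict Nat (List Char)),
      (∀ k ∈ d.keys, k ≤ bi) →
      (fixAsciiScan cs fuel bi lc d).items = d.items ++ pvIns cs fuel bi lc := by
  induction fuel with
  | zero => intro bi lc d _; simp [fixAsciiScan, pvIns]
  | succ fuel ih =>
    intro bi lc d hk
    by_cases h : bi < cs.length
    · simp only [fixAsciiScan, pvIns, if_pos h]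
      split_ifs with h1 h2 h3 h4
      · exact ih (bi+2) lc d (fun k hkk => le_trans (hk k hkk) (by omega))
      · have hc : d.contains (bi+1) = false := by
          cases hb : d.contains (bi+1) with
          | false => rfl
          | true =>
            have := hk _ ((PySem.Dict.contains_iff_mem_keys d (bi+1)).mp hb)
            omega
        rw [ih (bi+2) lc (d.insert (bi+1) lc)
          (by
            intro k hkk
            rw [PySem.Dict.keys_insert_of_not_contains d lc hc] at hkk
            rcases List.mem_append.mp hkk with hkk | hkk
            · exact le_trans (hk k hkk) (by omega)
            · simp at hkk; omega)]
        rw [PySem.Dict.items_insert_of_not_contains d lc hc]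
        simp
      · exact ih _ _ d (fun k hkk => le_trans (hk k hkk) (by omega))
      · exact ih _ _ d (fun k hkk => le_trans (hk k hkk) (by omega))
      · exact ih _ _ d (fun k hkk => le_trans (hk k hkk) (by omega))
    · simp [fixAsciiScan, pvIns, if_neg h]

-- B's pipeline observed through flatten: rendering the lexed tokens equals pvEmit
lemma pvLex_render (cs : List Char) (fuel : Nat) :
    ∀ (bi : Nat) (lc : List Char) (out : List (List Char)),
      ((fixAsciiLex cs fuel bi).foldl fixAsciiRender (lc, out)).2.flatten
        = out.flatten ++ pvEmit cs fuel bi lc := by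
  induction fuel with
  | zero => intro bi lc out; simp [fixAsciiLex, pvEmit]
  | succ fuel ih =>
    intro bi lc out
    by_cases h : bi < cs.length
    · have hd : cs.drop bi = cs[bi] :: cs.drop (bi+1) := List.drop_eq_getElem_cons h
      have hg : cs.getD bi ' ' = cs[bi] := List.getD_eq_getElem cs ' ' h
      simp only [fixAsciiLex, pvEmit, if_pos h, hg, hd, List.take_succ_cons, List.take_zero]
      split_ifs with h1 h2 h3 h4 h5 <;>
        simp_all [fixAsciiRender, List.append_assoc, pvTag,
          apply_ite (f := List.flatten)] <;>
        rw [if_neg (by tauto)] <;> simp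
    · simp [fixAsciiLex, pvEmit, if_neg h]

lemma pvMain (cs : List Char) (fuel : Nat) :
    ∀ (bi : Nat) (lc : List Char), cs.length ≤ bi + fuel →
      ((pvIns cs fuel bi lc).filter (fun kv => decide (kv.2 ≠ ([] : List Char)))).foldr
          (fun kv d => d.take kv.1 ++ pvTag kv.2 ++ d.drop kv.1) cs
        = cs.take bi ++ pvEmit cs fuel bi lc := by
  induction fuel with
  | zero =>
    intro bi lc hle
    simp only [pvIns, pvEmit, List.filter_nil, List.foldr_nil, List.append_nil]
    exact (List.take_of_length_le (by omega)).symm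
  | succ fuel ih =>
    intro bi lc hle
    by_cases h : bi < cs.length
    · have hd : cs.drop bi = cs[bi] :: cs.drop (bi+1) := List.drop_eq_getElem_cons h
      have htk2 : cs.take (bi+2) = cs.take bi ++ cs[bi] :: (cs.drop (bi+1)).take 1 := by
        rw [List.take_add, hd]; rfl
      by_cases h1 : (cs.drop bi).take 1 = ['\n']
      · have hc : cs[bi] = '\n' := by
          rw [hd] at h1; simpa [-List.getElem_cons_drop] using h1
        by_cases h2 : (cs.drop (bi+1)).take 2 = ['[', '/']
        · -- newline followed by "[/": no insertion, no tag
          simp only [pvIns, pvEmit, if_pos h, if_pos h1, if_pos h2,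
            if_neg (show ¬((cs.drop (bi+1)).take 2 ≠ ['[', '/'] ∧ lc ≠ []) by simp [h2])]
          rw [ih (bi+2) lc (by omega), htk2, hc]
          simp
        · -- newline not followed by "[/": A records (bi+1, lc); B tags iff lc ≠ []
          by_cases hlc : lc = ([] : List Char)
          · simp only [pvIns, pvEmit, if_pos h, if_pos h1, if_neg h2,
              if_neg (show ¬((cs.drop (bi+1)).take 2 ≠ ['[', '/'] ∧ lc ≠ []) by simp [hlc])]
            rw [List.filter_cons_of_neg (by simp [hlc])]
            rw [ih (bi+2) lc (by omega), htk2, hc]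
            simp
          · simp only [pvIns, pvEmit, if_pos h, if_pos h1, if_neg h2,
              if_pos (show (cs.drop (bi+1)).take 2 ≠ ['[', '/'] ∧ lc ≠ [] from ⟨h2, hlc⟩)]
            rw [List.filter_cons_of_pos (by simpa using hlc)]
            rw [List.foldr_cons, ih (bi+2) lc (by omega)]
            have htk1 : cs.take (bi+1) = cs.take bi ++ [cs[bi]] := by
              rw [List.take_add, hd]; rfl
            have hlen1 : (cs.take (bi+1)).length = bi + 1 := by
              rw [List.length_take]; omega
            have hsplit : cs.take (bi+2) ++ pvEmit cs fuel (bi+2) lc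
                = cs.take (bi+1) ++ ((cs.drop (bi+1)).take 1 ++ pvEmit cs fuel (bi+2) lc) := by
              rw [show bi+2 = (bi+1)+1 from rfl, List.take_add, List.append_assoc]
            rw [hsplit, List.take_left' hlen1, List.drop_left' hlen1, htk1, hc]
            simp [List.append_assoc]
      · by_cases h3 : (cs.drop bi).take 1 = ['['] ∧ (cs.drop (bi+1)).take 1 = ['c']
        · -- "[c" token
          simp only [pvIns, pvEmit, if_pos h, if_neg h1, if_pos h3]
          rw [ih (bi+15) _ (by omega), List.take_add, List.append_assoc]
        · by_cases h4 : (cs.drop bi).take 1 = ['['] ∧ (cs.drop (bi+1)).take 1 = ['/']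
          · -- "[/" token
            simp only [pvIns, pvEmit, if_pos h, if_neg h1, if_neg h3, if_pos h4]
            rw [ih (bi+8) _ (by omega), List.take_add, List.append_assoc]
          · -- default: advance one character
            simp only [pvIns, pvEmit, if_pos h, if_neg h1, if_neg h3, if_neg h4]
            rw [ih (bi+1) _ (by omega), List.take_add, List.append_assoc]
    · simp only [pvIns, pvEmit, if_neg h, List.filter_nil, List.foldr_nil,
        List.append_nil]
      exact (List.take_of_length_le (by omega)).symm

lemma pvJoinNil (l : List (List Char)) : PySem.Chars.join [] l = l.flatten := by
  induction l with
  | nil => simp [PySem.Chars.join_nil]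
  | cons a t ih =>
    cases t with
    | nil => simp [PySem.Chars.join_singleton]
    | cons b t' => rw [PySem.Chars.join_cons_cons]; simp [ih]

-- ===== VERDICT (by name: the statement is the Claim_ definition above) =====
theorem fixAscii_spec : Claim_equal_fixAscii := by
  intro data _ _
  unfold Spec_fixAscii fixAscii fixAscii_alt
  simp only [pvJoinNil, pvLex_render, List.flatten_nil, List.nil_append]
  rw [List.foldl_reverse]
  rw [pvScan_items data.toList data.toList.length 0 [] PySem.Dict.empty
    (by simp [PySem.Dict.keys_empty])]
  rw [show (PySem.Dict.empty : PySem.Dict Nat (List Char)).items = [] from rfl,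
    List.nil_append]
  rw [pvMain data.toList data.toList.length 0 [] (by omega)]
  simp
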